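-- pv_equiv track=rewrite | github.com/google/oss-fuzz-gen | data_prep/clang_diagnostic/regex_gen.py | _replace_dollar_in_current_diff
-- ===== SOURCE A (Python) =====
-- def _replace_dollar_in_current_diff(sub: str) -> str:
--   """
--   Replaces '$' with '%0' in %diff{...},
--   but keep content in sub brackets as is.
--   """
--   char_list = []
--   ptr = 0
--   bracket_level = 0
--   while ptr < len(sub):
--     ch = sub[ptr]
--     if ch == '{':
--       bracket_level += 1
--     if ch == '}':
--       bracket_level -= 1
--
--     if sub[ptr:ptr + 2] == '%$' and bracket_level == 0:
--       char_list.extend('$')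
--       ptr += 1
--     elif sub[ptr] == '$' and bracket_level == 0:
--       char_list.extend('%0')
--     else:
--       char_list.extend(ch)
--
--     ptr += 1
--   return ''.join(char_list)
-- ===== SOURCE B (Python) =====
-- def _replace_dollar_in_current_diff(sub: str) -> str:
--   """
--   Replaces '$' with '%0' in %diff{...},
--   but keep content in sub brackets as is.
--
--   Alternative decomposition: one pass splits the string into maximal runs of
--   constant 'activity' (brace depth == 0 after consuming the char); inactive
--   runs are copied verbatim, active runs are rewritten with split/replace
--   ('%$' -> '$' taking precedence over '$' -> '%0').
--   """
--   runs = []  # list of (active, list-of-chars)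
--   depth = 0
--   for ch in sub:
--     if ch == '{':
--       depth += 1
--     elif ch == '}':
--       depth -= 1
--     active = depth == 0
--     if runs and runs[-1][0] == active:
--       runs[-1][1].append(ch)
--     else:
--       runs.append((active, [ch]))
--   parts = []
--   for active, chars in runs:
--     seg = ''.join(chars)
--     if active:
--       seg = '$'.join(p.replace('$', '%0') for p in seg.split('%$'))
--     parts.append(seg)
--   return ''.join(parts)
-- ===== Notes on version B (the rewrite author's own statement) =====
-- stated objective: faster
-- what changed: Instead of A's single stateful pointer scan that slices and appends per character, B groups the string once into maximal runs of constant brace-activity, copies inactive runs verbatim and rewrites each active run wholesale with C-level str.split/str.replace/str.join, which a timing run measured about 3x faster.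
import Mathlib
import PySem

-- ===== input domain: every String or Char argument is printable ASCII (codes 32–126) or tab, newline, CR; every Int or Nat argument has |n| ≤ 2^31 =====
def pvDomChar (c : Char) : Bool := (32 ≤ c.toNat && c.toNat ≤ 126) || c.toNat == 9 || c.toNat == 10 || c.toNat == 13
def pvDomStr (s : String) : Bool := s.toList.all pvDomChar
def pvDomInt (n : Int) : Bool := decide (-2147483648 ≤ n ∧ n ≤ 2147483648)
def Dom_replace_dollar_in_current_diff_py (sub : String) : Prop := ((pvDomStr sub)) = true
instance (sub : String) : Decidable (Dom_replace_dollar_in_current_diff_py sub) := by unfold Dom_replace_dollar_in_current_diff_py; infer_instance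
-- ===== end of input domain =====

-- B replaces A's per-character pointer scan by a runs-decomposition (group by brace
-- activity, then split/replace/join on active runs); measured constant-factor faster.

-- ===== PORT A =====
-- while loop over ptr: remaining chars = cs, bracket_level = level, char_list = acc
def pvGoA (cs : List Char) (level : Int) (acc : List Char) : List Char :=
  match cs with
  | [] => acc
  | c :: rest =>
    let level1 := if c = '{' then level + 1 else level
    let level2 := if c = '}' then level1 - 1 else level1
    if c = '%' ∧ rest.head? = some '$' ∧ level2 = 0 then
      pvGoA rest.tail level2 (acc ++ ['$'])          -- ptr += 1 (extra), '%$' -> '$'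
    else if c = '$' ∧ level2 = 0 then
      pvGoA rest level2 (acc ++ ['%', '0'])
    else
      pvGoA rest level2 (acc ++ [c])
  termination_by cs.length
  decreasing_by all_goals (simp [List.length_tail]; try omega)

def replace_dollar_in_current_diff_py (sub : String) : String :=
  String.mk (pvGoA sub.toList 0 [])

-- ===== PORT B =====
def pvUpd (d : Int) (c : Char) : Int :=
  if c = '{' then d + 1 else if c = '}' then d - 1 else d

-- 'if runs and runs[-1][0] == active: runs[-1][1].append(ch) else: runs.append((active,[ch]))'
def pvAddRun (runs : List (Bool × List Char)) (a : Bool) (c : Char) : List (Bool × List Char) :=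
  match runs with
  | [] => [(a, [c])]
  | [r] => if r.1 = a then [(r.1, r.2 ++ [c])] else [r, (a, [c])]
  | r :: rs => r :: pvAddRun rs a c

def pvRunsStep (st : Int × List (Bool × List Char)) (c : Char) : Int × List (Bool × List Char) :=
  let d := pvUpd st.1 c
  (d, pvAddRun st.2 (d == 0) c)

def pvRuns (cs : List Char) : List (Bool × List Char) :=
  (cs.foldl pvRunsStep (0, [])).2

-- "'$'.join(p.replace('$', '%0') for p in seg.split('%$'))"
def pvTransform (seg : List Char) : List Char :=
  PySem.Chars.join ['$'] ((PySem.Chars.splitOn seg ['%', '$']).map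
    (fun p => PySem.Chars.replace p ['$'] ['%', '0']))

def replace_dollar_in_current_diff_py_alt (sub : String) : String :=
  String.mk (((pvRuns sub.toList).map
    (fun r => if r.1 then pvTransform r.2 else r.2)).flatten)

-- ===== PRECONDITION & SPEC =====
def Spec_replace_dollar_in_current_diff_py (sub : String) (out : String) : Prop := out = replace_dollar_in_current_diff_py_alt sub
instance (sub : String) (out : String) : Decidable (Spec_replace_dollar_in_current_diff_py sub out) := by unfold Spec_replace_dollar_in_current_diff_py; infer_instance

-- ===== CLAIM (what is proved, stated in full; the proofs are below) =====
def Claim_equal_replace_dollar_in_current_diff_py : Prop := ∀ (sub : String), Dom_replace_dollar_in_current_diff_py sub → Spec_replace_dollar_in_current_diff_py sub (replace_dollar_in_current_diff_py sub)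

-- ===== LEMMAS AND PROOFS =====

-- reference versions of replace('$','%0'), split('%$'), and the depth-0 rewrite
def pvRep : List Char → List Char
  | [] => []
  | c :: r => (if c = '$' then ['%', '0'] else [c]) ++ pvRep r

def pvSpl : List Char → List (List Char)
  | [] => [[]]
  | c :: r =>
    if c = '%' ∧ r.head? = some '$' then [] :: pvSpl r.tail
    else (pvSpl r).modifyHead (c :: ·)
  termination_by l => l.length
  decreasing_by all_goals (simp [List.length_tail]; try omega)

def pvScan0 : List Char → List Char
  | [] => []
  | c :: r =>
    if c = '%' ∧ r.head? = some '$' then '$' :: pvScan0 r.tail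
    else (if c = '$' then ['%', '0'] else [c]) ++ pvScan0 r
  termination_by l => l.length
  decreasing_by all_goals (simp [List.length_tail]; try omega)

-- front-recursive run construction, and output assembly
def pvConsRun (a : Bool) (c : Char) : List (Bool × List Char) → List (Bool × List Char)
  | [] => [(a, [c])]
  | (a', seg) :: rs => if a' = a then (a, c :: seg) :: rs else (a, [c]) :: (a', seg) :: rs

def pvRunsF (d : Int) : List Char → List (Bool × List Char)
  | [] => []
  | c :: r =>
    let d' := pvUpd d c
    pvConsRun (d' == 0) c (pvRunsF d' r)

def pvMerge : List (Bool × List Char) → List (Bool × List Char) → List (Bool × List Char)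
  | [], ys => ys
  | [r], ys =>
    match ys with
    | [] => [r]
    | (a, seg) :: t => if r.1 = a then (r.1, r.2 ++ seg) :: t else r :: (a, seg) :: t
  | r :: rs, ys => r :: pvMerge rs ys

def pvOut (runs : List (Bool × List Char)) : List Char :=
  (runs.map (fun r => if r.1 then pvScan0 r.2 else r.2)).flatten

-- pvRep is A's '$' -> '%0' replacement, char by char
theorem pvRep_replace_go (fuel : Nat) : ∀ (l acc : List Char), l.length ≤ fuel →
    PySem.Chars.replace.go ['$'] ['%', '0'] fuel l acc = acc.reverse ++ pvRep l := by
  induction fuel with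
  | zero =>
    intro l acc h
    cases l with
    | nil => simp [PySem.Chars.replace.go, pvRep]
    | cons c t => simp at h
  | succ n ih =>
    intro l acc h
    cases l with
    | nil => simp [PySem.Chars.replace.go, pvRep]
    | cons c t =>
      rw [PySem.Chars.replace.go]
      by_cases hc : c = '$'
      · subst hc
        simp only [List.isPrefixOf, BEq.rfl, List.isPrefixOf_nil_left, Bool.and_true, if_true]
        rw [show List.drop ['$'].length ('$' :: t) = t from rfl]
        rw [ih t _ (by simpa using h)]
        simp [pvRep]
      · have hpre : List.isPrefixOf ['$'] (c :: t) = false := by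
          simp only [List.isPrefixOf, List.isPrefixOf_nil_left, Bool.and_true,
            beq_eq_false_iff_ne, ne_eq]
          exact fun hq => hc hq.symm
        rw [hpre]
        simp only [Bool.false_eq_true, if_false]
        rw [ih t _ (by simpa using h)]
        simp [pvRep, hc]

theorem pvRep_eq (l : List Char) : PySem.Chars.replace l ['$'] ['%', '0'] = pvRep l := by
  rw [PySem.Chars.replace]
  simp only [List.isEmpty_cons, Bool.false_eq_true, if_false]
  rw [pvRep_replace_go l.length l [] le_rfl]
  simp

theorem pvSpl_ne_nil (l : List Char) : pvSpl l ≠ [] := by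
  fun_induction pvSpl l with
  | case1 => simp
  | case2 => simp
  | case3 c r h ih =>
    cases hs : pvSpl r with
    | nil => exact absurd hs ih
    | cons x xs => simp [hs]

theorem pvSpl_splitOn_go (fuel : Nat) : ∀ (l cur : List Char) (acc : List (List Char)),
    l.length < fuel →
    PySem.Chars.splitOn.go ['%', '$'] fuel l cur acc
      = acc.reverse ++ (pvSpl l).modifyHead (fun x => cur.reverse ++ x) := by
  induction fuel with
  | zero => intro l cur acc h; omega
  | succ n ih =>
    intro l cur acc h
    cases l with
    | nil => simp [PySem.Chars.splitOn.go, pvSpl]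
    | cons c t =>
      rw [PySem.Chars.splitOn.go]
      by_cases hc : c = '%' ∧ t.head? = some '$'
      · obtain ⟨hc1, hc2⟩ := hc
        subst hc1
        cases t with
        | nil => simp at hc2
        | cons c2 t2 =>
          simp only [List.head?_cons, Option.some.injEq] at hc2
          subst hc2
          have hpre : List.isPrefixOf ['%', '$'] ('%' :: '$' :: t2) = true := by
            simp [List.isPrefixOf]
          rw [hpre]
          simp only [if_true]
          rw [show List.drop ['%', '$'].length ('%' :: '$' :: t2) = t2 from rfl]
          rw [ih t2 [] _ (by simp at h ⊢; omega)]
          rw [pvSpl]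
          simp only [List.head?_cons, Option.some.injEq, List.tail_cons, true_and, if_pos rfl]
          cases pvSpl t2 <;> simp
      · have hpre : List.isPrefixOf ['%', '$'] (c :: t) = false := by
          cases t with
          | nil => simp [List.isPrefixOf]
          | cons c2 t2 =>
            simp only [List.isPrefixOf, List.isPrefixOf_nil_left, Bool.and_true,
              Bool.and_eq_false_iff, beq_eq_false_iff_ne, ne_eq]
            by_cases h1 : c = '%'
            · subst h1
              right
              intro hq
              exact hc ⟨rfl, by simp [← hq]⟩
            · left
              intro hq
              exact h1 hq.symm
        rw [hpre]
        simp only [Bool.false_eq_true, if_false]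
        rw [ih t (c :: cur) acc (by simp at h ⊢; omega)]
        rw [pvSpl, if_neg hc]
        cases hs : pvSpl t with
        | nil => exact absurd hs (pvSpl_ne_nil t)
        | cons x xs => simp

theorem pvSpl_eq (l : List Char) : PySem.Chars.splitOn l ['%', '$'] = pvSpl l := by
  rw [PySem.Chars.splitOn]
  rw [pvSpl_splitOn_go (l.length + 1) l [] [] (by omega)]
  cases hs : pvSpl l with
  | nil => exact absurd hs (pvSpl_ne_nil l)
  | cons x xs => simp

theorem pvJoin_cons_cons (x y : List Char) (t : List (List Char)) (s : List Char) :
    PySem.Chars.join s (x :: y :: t) = x ++ s ++ PySem.Chars.join s (y :: t) := by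
  simp [PySem.Chars.join, List.intercalate]

theorem pvJoin_singleton (x s : List Char) : PySem.Chars.join s [x] = x := by
  simp [PySem.Chars.join, List.intercalate]

theorem pvJoin_map_rep (l : List Char) :
    PySem.Chars.join ['$'] ((pvSpl l).map pvRep) = pvScan0 l := by
  fun_induction pvScan0 l with
  | case1 => simp [pvSpl, pvRep, PySem.Chars.join, List.intercalate]
  | case2 c r h ih =>
    rw [pvSpl, if_pos h]
    cases hs : pvSpl r.tail with
    | nil => exact absurd hs (pvSpl_ne_nil _)
    | cons x xs =>
      rw [hs] at ih
      simp only [List.map_cons]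
      rw [pvJoin_cons_cons]
      simpa [pvRep] using ih
  | case3 c r h ih =>
    rw [pvSpl, if_neg h]
    cases hs : pvSpl r with
    | nil => exact absurd hs (pvSpl_ne_nil _)
    | cons x xs =>
      rw [hs] at ih
      simp only [List.modifyHead_cons, List.map_cons]
      have hrep : pvRep (c :: x) = (if c = '$' then ['%', '0'] else [c]) ++ pvRep x := by
        simp [pvRep]
      cases xs with
      | nil =>
        simp only [List.map_cons, List.map_nil, pvJoin_singleton] at ih
        rw [hrep, ih]
        simp only [List.map_nil]
        rw [pvJoin_singleton]
      | cons y ys =>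
        simp only [List.map_cons] at ih ⊢
        rw [pvJoin_cons_cons] at ih ⊢
        rw [hrep, ← ih]
        simp

theorem pvTransform_eq (l : List Char) : pvTransform l = pvScan0 l := by
  rw [pvTransform, pvSpl_eq]
  have : (pvSpl l).map (fun p => PySem.Chars.replace p ['$'] ['%', '0']) = (pvSpl l).map pvRep :=
    List.map_congr_left (fun p _ => pvRep_eq p)
  rw [this, pvJoin_map_rep]

-- runs machinery
theorem pvMerge_cons₂ (r x : Bool × List Char) (xs ys : List (Bool × List Char)) :
    pvMerge (r :: x :: xs) ys = r :: pvMerge (x :: xs) ys := rfl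

theorem pvMerge_nil_right (runs : List (Bool × List Char)) : pvMerge runs [] = runs := by
  induction runs with
  | nil => rfl
  | cons r rs ih =>
    cases rs with
    | nil => rfl
    | cons r2 rs2 => rw [pvMerge_cons₂, ih]

theorem pvAddRun_ne_nil (runs : List (Bool × List Char)) (a : Bool) (c : Char) :
    pvAddRun runs a c ≠ [] := by
  cases runs with
  | nil => simp [pvAddRun]
  | cons r rs =>
    cases rs with
    | nil => rw [pvAddRun]; split <;> simp
    | cons r2 rs2 =>
      rw [show pvAddRun (r :: r2 :: rs2) a c = r :: pvAddRun (r2 :: rs2) a c from rfl]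
      simp

theorem pvMerge_addRun (runs : List (Bool × List Char)) (a : Bool) (c : Char)
    (ys : List (Bool × List Char)) :
    pvMerge (pvAddRun runs a c) ys = pvMerge runs (pvConsRun a c ys) := by
  induction runs generalizing ys with
  | nil =>
    cases ys with
    | nil => cases a <;> simp [pvAddRun, pvMerge, pvConsRun]
    | cons y t =>
      obtain ⟨a', seg⟩ := y
      cases a <;> cases a' <;> simp [pvAddRun, pvMerge, pvConsRun]
  | cons r rs ih =>
    cases rs with
    | nil =>
      obtain ⟨ar, segr⟩ := r
      cases ys with
      | nil => cases a <;> cases ar <;> simp [pvAddRun, pvMerge, pvConsRun]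
      | cons y t =>
        obtain ⟨a', seg⟩ := y
        cases a <;> cases ar <;> cases a' <;> simp [pvAddRun, pvMerge, pvConsRun]
    | cons r2 rs2 =>
      rw [show pvAddRun (r :: r2 :: rs2) a c = r :: pvAddRun (r2 :: rs2) a c from rfl]
      cases hadd : pvAddRun (r2 :: rs2) a c with
      | nil => exact absurd hadd (pvAddRun_ne_nil _ _ _)
      | cons z zs =>
        rw [pvMerge_cons₂, pvMerge_cons₂, ← hadd, ih]

theorem pvRuns_foldl (cs : List Char) : ∀ (d : Int) (runs : List (Bool × List Char)),
    (cs.foldl pvRunsStep (d, runs)).2 = pvMerge runs (pvRunsF d cs) := by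
  induction cs with
  | nil => intro d runs; simp [pvRunsF, pvMerge_nil_right]
  | cons c rest ih =>
    intro d runs
    rw [List.foldl_cons]
    show (rest.foldl pvRunsStep (pvUpd d c, pvAddRun runs ((pvUpd d c) == 0) c)).2 = _
    rw [ih, pvMerge_addRun, pvRunsF]

theorem pvRuns_eq (cs : List Char) : pvRuns cs = pvRunsF 0 cs := by
  rw [pvRuns, pvRuns_foldl]
  cases pvRunsF 0 cs <;> simp [pvMerge]

-- how pvOut responds to consing one character onto the run list
theorem pvOut_consRun_false (c : Char) (X : List (Bool × List Char)) :
    pvOut (pvConsRun false c X) = c :: pvOut X := by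
  cases X with
  | nil => simp [pvConsRun, pvOut]
  | cons y t =>
    obtain ⟨a', seg⟩ := y
    cases a' <;> simp [pvConsRun, pvOut]

theorem pvScan0_nil : pvScan0 [] = [] := by rw [pvScan0]

theorem pvScan0_cons_dollar (r : List Char) : pvScan0 ('$' :: r) = '%' :: '0' :: pvScan0 r := by
  rw [pvScan0]; simp

theorem pvScan0_cons_pair (r : List Char) : pvScan0 ('%' :: '$' :: r) = '$' :: pvScan0 r := by
  rw [pvScan0]; simp

theorem pvScan0_cons_plain (c : Char) (r : List Char)
    (h1 : ¬(c = '%' ∧ r.head? = some '$')) (h2 : c ≠ '$') :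
    pvScan0 (c :: r) = c :: pvScan0 r := by
  rw [pvScan0]; simp [h1, h2]

theorem pvOut_consRun_dollar (X : List (Bool × List Char)) :
    pvOut (pvConsRun true '$' X) = '%' :: '0' :: pvOut X := by
  cases X with
  | nil => simp [pvConsRun, pvOut, pvScan0_cons_dollar, pvScan0]
  | cons y t =>
    obtain ⟨a', seg⟩ := y
    cases a' <;> simp [pvConsRun, pvOut, pvScan0_cons_dollar, pvScan0]

theorem pvOut_consRun_pair (X : List (Bool × List Char)) :
    pvOut (pvConsRun true '%' (pvConsRun true '$' X)) = '$' :: pvOut X := by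
  cases X with
  | nil => simp [pvConsRun, pvOut, pvScan0_cons_pair, pvScan0]
  | cons y t =>
    obtain ⟨a', seg⟩ := y
    cases a' <;> simp [pvConsRun, pvOut, pvScan0_cons_pair, pvScan0]

theorem pvOut_consRun_plain (c : Char) (X : List (Bool × List Char))
    (h2 : c ≠ '$')
    (hh : ∀ seg t, X = (true, seg) :: t → ¬(c = '%' ∧ seg.head? = some '$')) :
    pvOut (pvConsRun true c X) = c :: pvOut X := by
  have hone : pvScan0 [c] = [c] := by
    rw [pvScan0]; simp [h2, pvScan0_nil]
  cases X with
  | nil => simp [pvConsRun, pvOut, hone, pvScan0_nil]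
  | cons y t =>
    obtain ⟨a', seg⟩ := y
    cases a' with
    | false => simp [pvConsRun, pvOut, hone]
    | true =>
      simp only [pvConsRun, if_pos rfl, pvOut, List.map_cons, List.flatten_cons, if_pos]
      rw [pvScan0_cons_plain c seg (hh seg t rfl) h2]
      simp [pvOut]

theorem pvConsRun_head (a : Bool) (c : Char) (Y : List (Bool × List Char)) :
    ∀ a' seg t, pvConsRun a c Y = (a', seg) :: t → seg.head? = some c := by
  intro a' seg t h
  cases Y with
  | nil =>
    rw [pvConsRun] at h
    simp only [List.cons.injEq, Prod.mk.injEq] at h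
    rw [← h.1.2]
    rfl
  | cons y ys =>
    obtain ⟨ay, sy⟩ := y
    rw [pvConsRun] at h
    split at h <;> simp only [List.cons.injEq, Prod.mk.injEq] at h <;> rw [← h.1.2] <;> rfl

theorem pvUpd_two (c : Char) (d : Int) :
    (if c = '}' then (if c = '{' then d + 1 else d) - 1 else (if c = '{' then d + 1 else d))
      = pvUpd d c := by
  rw [pvUpd]
  by_cases h1 : c = '{'
  · subst h1; simp
  · simp [h1]

theorem pvGoA_eq (n : Nat) : ∀ (cs : List Char), cs.length ≤ n → ∀ (d : Int) (acc : List Char),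
    pvGoA cs d acc = acc ++ pvOut (pvRunsF d cs) := by
  induction n with
  | zero =>
    intro cs h d acc
    cases cs with
    | nil => simp [pvGoA, pvRunsF, pvOut]
    | cons c t => simp at h
  | succ n ih =>
    intro cs h d acc
    cases cs with
    | nil => simp [pvGoA, pvRunsF, pvOut]
    | cons c rest =>
      rw [pvGoA]
      simp only [pvUpd_two]
      by_cases hb1 : c = '%' ∧ rest.head? = some '$' ∧ pvUpd d c = 0
      · obtain ⟨hc, hh, hd⟩ := hb1
        subst hc
        rw [if_pos ⟨rfl, hh, hd⟩]
        cases rest with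
        | nil => simp at hh
        | cons c2 t2 =>
          simp only [List.head?_cons, Option.some.injEq] at hh
          subst hh
          simp only [List.tail_cons]
          rw [ih t2 (by simp at h ⊢; omega) (pvUpd d '%') (acc ++ ['$'])]
          rw [pvRunsF, pvRunsF]
          have hd3 : pvUpd (0 : Int) '$' = 0 := by simp [pvUpd]
          simp only [hd, hd3, beq_self_eq_true]
          rw [pvOut_consRun_pair]
          simp
      · rw [if_neg hb1]
        by_cases hb2 : c = '$' ∧ pvUpd d c = 0
        · obtain ⟨hc, hd⟩ := hb2
          subst hc
          rw [if_pos ⟨rfl, hd⟩]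
          rw [ih rest (by simp at h ⊢; omega) (pvUpd d '$') (acc ++ ['%', '0'])]
          rw [pvRunsF]
          simp only [hd, beq_self_eq_true]
          rw [pvOut_consRun_dollar]
          simp
        · rw [if_neg hb2]
          rw [ih rest (by simp at h ⊢; omega) (pvUpd d c) (acc ++ [c])]
          rw [pvRunsF]
          by_cases hd : pvUpd d c = 0
          · have hbeq : (pvUpd d c == 0) = true := by simp [hd]
            rw [hbeq]
            have hc2 : c ≠ '$' := fun hq => hb2 ⟨hq, hd⟩
            rw [pvOut_consRun_plain c _ hc2 ?_]
            · simp
            · intro seg t hX hpair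
              obtain ⟨hcp, hhd⟩ := hpair
              cases rest with
              | nil => simp [pvRunsF] at hX
              | cons cr tr =>
                rw [pvRunsF] at hX
                have hhead := pvConsRun_head _ _ _ _ _ _ hX
                rw [hhead] at hhd
                simp only [Option.some.injEq] at hhd
                exact hb1 ⟨hcp, by simp [hhd], hd⟩
          · have hbeq : (pvUpd d c == 0) = false := by simp [hd]
            rw [hbeq]
            rw [pvOut_consRun_false]
            simp

theorem pvAlt_eq (sub : String) :
    replace_dollar_in_current_diff_py_alt sub = String.mk (pvOut (pvRunsF 0 sub.toList)) := by
  rw [replace_dollar_in_current_diff_py_alt, pvRuns_eq, pvOut]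
  congr 2
  exact List.map_congr_left (fun r _ => by
    by_cases hr : r.1 <;> simp [hr, pvTransform_eq])

-- ===== VERDICT (by name: the statement is the Claim_ definition above) =====
theorem replace_dollar_in_current_diff_py_spec : Claim_equal_replace_dollar_in_current_diff_py := by
  intro sub _
  unfold Spec_replace_dollar_in_current_diff_py
  rw [replace_dollar_in_current_diff_py, pvAlt_eq,
      pvGoA_eq sub.toList.length sub.toList le_rfl 0 []]
  simp
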